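-- pv_equiv track=rewrite | github.com/kisapapa1227/ReTReKpy | make_reports/readDb.py | addCatal2
-- ===== SOURCE A (Python) =====
-- def addCatal2(s,p):
--     pp=[]
--     for m,ss in enumerate(s):
--         if ss=='>':
--             return pp
--         if not ss in p:
--             pp.append(m)
--     return pp
-- ===== SOURCE B (Python) =====
-- def addCatal2(s, p):
--     cut = s.find('>')
--     if cut == -1:
--         cut = len(s)
--     pos = {}
--     for i in range(cut):
--         pos.setdefault(s[i], []).append(i)
--     bad = set()
--     for c in set(p):
--         bad.update(pos.get(c, []))
--     return sorted(set(range(cut)) - bad)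
-- ===== Notes on version B (the rewrite author's own statement) =====
-- stated objective: alternative
-- what changed: Inverted data flow: instead of A's single scan testing each character's membership in p with an early return at '>', B finds the '>' boundary, builds a char-to-positions index of s[:cut] in one pass, unions the position lists of p's characters into a 'bad' set, and returns the sorted set-difference set(range(cut)) - bad.
import Mathlib
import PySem

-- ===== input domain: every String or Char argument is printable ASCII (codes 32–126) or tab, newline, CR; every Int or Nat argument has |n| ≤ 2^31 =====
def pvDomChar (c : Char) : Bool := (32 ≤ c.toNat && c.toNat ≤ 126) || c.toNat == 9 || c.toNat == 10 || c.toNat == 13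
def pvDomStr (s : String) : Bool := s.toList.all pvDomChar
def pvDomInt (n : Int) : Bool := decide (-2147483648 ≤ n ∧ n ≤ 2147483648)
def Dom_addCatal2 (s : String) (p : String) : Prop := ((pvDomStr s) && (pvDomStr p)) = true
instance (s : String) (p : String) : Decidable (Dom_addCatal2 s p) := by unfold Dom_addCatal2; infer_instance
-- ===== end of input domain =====

-- B inverts the data flow: find the '>' boundary, build a char-to-positions index of the prefix,
-- union the position lists of p's characters into a 'bad' set, and return sorted(set(range(cut)) - bad).

-- ===== PORT A =====
-- A's for-loop over enumerate(s) with accumulator pp and early return at '>'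
def addCatal2Loop (p : String) : List Char → Int → List Int → List Int
  | [], _, pp => pp
  | ss :: rest, m, pp =>
    if ss = '>' then pp
    else addCatal2Loop p rest (m + 1)
      (if !PySem.Str.isIn (String.singleton ss) p then pp ++ [m] else pp)

def addCatal2 (s : String) (p : String) : List Int :=
  addCatal2Loop p s.toList 0 []

-- ===== PORT B =====
def addCatal2_alt (s : String) (p : String) : List Int :=
  let f := PySem.Str.find s ">"
  let cut : Int := if f = -1 then (PySem.Str.len s : Int) else f
  let pos : PySem.Dict Char (List Int) :=
    (PySem.List.pyRange 0 cut 1).foldl (fun pos i =>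
      -- pos.setdefault(s[i], []).append(i); i ∈ range(cut) with cut ≤ len(s), so s[i] is always valid
      match PySem.Str.pyGet? s i with
      | some c => pos.modify c [] (· ++ [i])
      | none => pos) PySem.Dict.empty
  let bad : PySem.Set Int :=
    -- 'for c in set(p)': the loop builds a set only consulted by membership, so iteration order cannot matter
    (PySem.Set.ofList p.toList).foldl (fun bad c => PySem.Set.update bad (pos.getD c [])) PySem.Set.empty
  PySem.List.sorted (PySem.Set.diff (PySem.Set.ofList (PySem.List.pyRange 0 cut 1)) bad) (fun x => x) false

-- ===== PRECONDITION & SPEC =====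
def Spec_addCatal2 (s : String) (p : String) (out : List Int) : Prop := out = addCatal2_alt s p
instance (s : String) (p : String) (out : List Int) : Decidable (Spec_addCatal2 s p out) := by unfold Spec_addCatal2; infer_instance

-- ===== CLAIM (what is proved, stated in full; the proofs are below) =====
def Claim_equal_addCatal2 : Prop := ∀ (s : String) (p : String), Dom_addCatal2 s p → Spec_addCatal2 s p (addCatal2 s p)

-- ===== LEMMAS AND PROOFS =====

-- accumulator-free version of A's loop
def aRef (p : String) : List Char → Int → List Int
  | [], _ => []
  | ss :: rest, m =>
    if ss = '>' then []
    else if !PySem.Str.isIn (String.singleton ss) p then m :: aRef p rest (m + 1)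
    else aRef p rest (m + 1)

theorem addCatal2Loop_eq (p : String) (t : List Char) (m : Int) (pp : List Int) :
    addCatal2Loop p t m pp = pp ++ aRef p t m := by
  induction t generalizing m pp with
  | nil => simp [addCatal2Loop, aRef]
  | cons c t ih =>
    simp only [addCatal2Loop, aRef]
    split_ifs with h1 h2 <;> simp [ih]

def cutLen (t : List Char) : Nat := (t.takeWhile (· ≠ '>')).length

theorem cutLen_nil : cutLen [] = 0 := rfl

theorem cutLen_cons_gt (t : List Char) : cutLen ('>' :: t) = 0 := by
  unfold cutLen
  rw [List.takeWhile_cons, if_neg (by simp)]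
  rfl

theorem cutLen_cons (c : Char) (t : List Char) (h : c ≠ '>') :
    cutLen (c :: t) = cutLen t + 1 := by
  unfold cutLen
  rw [List.takeWhile_cons, if_pos (by simp [h])]
  simp

theorem main_lemma (s p : String) (t : List Char) (m : Nat)
    (ht : s.toList.drop m = t) :
    aRef p t (m : Int) =
      (PySem.List.pyRange (m : Int) ((m : Int) + (cutLen t : Int)) 1).filter (fun j =>
        match PySem.Str.pyGet? s j with
        | some c => !PySem.Str.isIn (String.singleton c) p
        | none => false) := by
  induction t generalizing m with
  | nil =>
    rw [cutLen_nil]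
    simp only [Nat.cast_zero, add_zero]
    rw [PySem.List.pyRange_one_eq_nil (le_refl _)]
    rfl
  | cons c t ih =>
    have hget : s.toList[m]? = some c := by
      have h1 : (s.toList.drop m).head? = s.toList[m]? := List.head?_drop
      rw [ht] at h1
      simpa using h1.symm
    by_cases hgt : c = '>'
    · subst hgt
      rw [cutLen_cons_gt]
      simp only [aRef, Nat.cast_zero, add_zero, if_pos]
      rw [PySem.List.pyRange_one_eq_nil (le_refl _)]
      rfl
    · have hcut : cutLen (c :: t) = cutLen t + 1 := cutLen_cons c t hgt
      have hcons : PySem.List.pyRange (m : Int) ((m : Int) + (cutLen (c :: t) : Int)) 1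
          = (m : Int) :: PySem.List.pyRange ((m : Int) + 1) ((m : Int) + (cutLen (c :: t) : Int)) 1 := by
        apply PySem.List.pyRange_one_cons
        rw [hcut]; push_cast; omega
      have ht' : s.toList.drop (m + 1) = t := by
        rw [← List.tail_drop, ht]; rfl
      have ihm := ih (m + 1) ht'
      have hpg : PySem.Str.pyGet? s (m : Int) = some c := by
        simpa using hget
      simp only [aRef, hgt, if_false, hcons, List.filter_cons, hpg]
      have ihm' : aRef p t ((m : Int) + 1) =
          (PySem.List.pyRange ((m : Int) + 1) (((m : Int) + 1) + (cutLen t : Int)) 1).filter (fun j =>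
            match PySem.Str.pyGet? s j with
            | some c => !PySem.Str.isIn (String.singleton c) p
            | none => false) := by
        push_cast at ihm
        exact ihm
      have hend : (m : Int) + (cutLen (c :: t) : Int) = ((m : Int) + 1) + (cutLen t : Int) := by
        rw [hcut]; push_cast; ring
      rw [hend, ← ihm']

theorem takeWhile_len_first (l : List Char) (w : Nat)
    (hgw : l[w]? = some '>') (hbef : ∀ i < w, l[i]? ≠ some '>') :
    cutLen l = w := by
  induction l generalizing w with
  | nil => simp at hgw
  | cons a u ihl =>
    cases w with
    | zero =>
      simp only [List.getElem?_cons_zero, Option.some_inj] at hgw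
      subst hgw
      exact cutLen_cons_gt u
    | succ w' =>
      have ha : a ≠ '>' := by
        intro hrfl
        exact hbef 0 (by omega) (by simp [hrfl])
      rw [cutLen_cons a u ha]
      simp only [List.getElem?_cons_succ] at hgw
      have hrec : cutLen u = w' := by
        apply ihl w' hgw
        intro i hi
        have := hbef (i + 1) (by omega)
        simpa using this
      omega

theorem cut_eq (s : String) :
    (if PySem.Str.find s ">" = -1 then (PySem.Str.len s : Int) else PySem.Str.find s ">")
      = (cutLen s.toList : Int) := by
  have hsub : (">" : String).toList = ['>'] := rfl
  by_cases h : PySem.Str.find s ">" = -1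
  · have hni : ¬ (">" : String).toList <:+: s.toList := by
      rw [← PySem.Str.find_eq_neg_one_iff]; exact h
    have hnm : '>' ∉ s.toList := by
      intro hm
      rw [hsub] at hni
      rcases List.mem_iff_append.mp hm with ⟨u, v, huv⟩
      exact hni ⟨u, v, by rw [huv]; simp⟩
    have htw : s.toList.takeWhile (· ≠ '>') = s.toList :=
      List.takeWhile_eq_self_iff.mpr (by intro x hx; simp only [decide_eq_true_eq]; rintro rfl; exact hnm hx)
    rw [if_pos h]
    unfold cutLen
    rw [htw]
    simp [PySem.Str.len_eq]
  · have hfe : PySem.Chars.find s.toList ['>'] = PySem.Str.find s ">" := by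
      rw [← hsub]; simp [PySem.Str.find_eq]
    have hnn : 0 ≤ PySem.Str.find s ">" := by
      have h1 := PySem.Chars.neg_one_le_find s.toList ['>']
      rw [hfe] at h1
      omega
    set v := (PySem.Str.find s ">").toNat with hv
    have hspec := PySem.Chars.find_spec (s := s.toList) (sub := ['>']) (by rw [hfe]; exact hnn)
    rw [hfe] at hspec
    obtain ⟨hpre, hmin⟩ := hspec
    have hgetv : s.toList[v]? = some '>' := by
      rcases hpre with ⟨u, hu⟩
      rw [← List.head?_drop, ← hu]
      rfl
    have hbefore : ∀ i < v, s.toList[i]? ≠ some '>' := by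
      intro i hi hcon
      apply hmin i hi
      have h1 : (s.toList.drop i).head? = some '>' := by
        rw [List.head?_drop]; exact hcon
      refine ⟨s.toList.drop (i + 1), ?_⟩
      cases hd : s.toList.drop i with
      | nil => rw [hd] at h1; simp at h1
      | cons a u =>
        rw [hd] at h1
        simp only [List.head?_cons, Option.some_inj] at h1
        have h2 : u = s.toList.drop (i + 1) := by
          have := congrArg List.tail hd
          rw [List.tail_drop] at this
          simpa using this.symm
        rw [h1, ← h2]
        rfl
    have htw : cutLen s.toList = v := takeWhile_len_first s.toList v hgetv hbefore
    rw [if_neg h, htw]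
    omega

-- the positions dict: pos[c] is the list of below-cut positions whose character is c
theorem pos_getD (s : String) (cut : Int) (c : Char) (keyf : Int → Char)
    (h : ∀ i ∈ PySem.List.pyRange 0 cut 1, PySem.Str.pyGet? s i = some (keyf i)) :
    ((PySem.List.pyRange 0 cut 1).foldl (fun pos i =>
      match PySem.Str.pyGet? s i with
      | some c => pos.modify c [] (· ++ [i])
      | none => pos) PySem.Dict.empty).getD c []
    = (PySem.List.pyRange 0 cut 1).filter (fun i => keyf i == c) := by
  have hcg : (PySem.List.pyRange 0 cut 1).foldl (fun pos i =>
        match PySem.Str.pyGet? s i with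
        | some c => pos.modify c [] (· ++ [i])
        | none => pos) PySem.Dict.empty
      = (PySem.List.pyRange 0 cut 1).foldl
          (fun d i => PySem.Dict.modify d (keyf i) [] (· ++ [i])) PySem.Dict.empty :=
    PySem.List.foldl_congr_mem _ _ _ _ (fun acc i hi => by rw [h i hi])
  rw [hcg]
  rw [← List.foldl_map (f := fun i => (keyf i, i))
      (g := fun d (q : Char × Int) => PySem.Dict.modify d q.1 [] (· ++ [q.2]))]
  rw [PySem.Dict.getD_foldl_modify_append, PySem.Dict.getD_empty]
  simp only [List.nil_append, List.filter_map, List.map_map]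
  simp [Function.comp_def]

-- membership in B's 'bad' set: union over p's characters of their position lists
theorem bad_mem (pos : PySem.Dict Char (List Int)) (p0 : List Char) (acc : PySem.Set Int) (j : Int) :
    j ∈ p0.foldl (fun bad c => PySem.Set.update bad (pos.getD c [])) acc
      ↔ j ∈ acc ∨ ∃ c ∈ p0, j ∈ pos.getD c [] := by
  induction p0 generalizing acc with
  | nil => simp
  | cons c p0 ih =>
    simp only [List.foldl_cons, ih, PySem.Set.mem_update, List.mem_cons]
    constructor
    · rintro ((hj | hj) | ⟨d, hd, hjd⟩)
      · exact Or.inl hj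
      · exact Or.inr ⟨c, Or.inl rfl, hj⟩
      · exact Or.inr ⟨d, Or.inr hd, hjd⟩
    · rintro (hj | ⟨d, (rfl | hd), hjd⟩)
      · exact Or.inl (Or.inl hj)
      · exact Or.inl (Or.inr hjd)
      · exact Or.inr ⟨d, hd, hjd⟩

-- single-character 'c in p' is list membership
theorem isIn_singleton (c : Char) (p : String) :
    PySem.Str.isIn (String.singleton c) p = true ↔ c ∈ p.toList := by
  rw [PySem.Str.isIn_iff_infix]
  rw [String.toList_singleton]
  constructor
  · rintro ⟨u, v, huv⟩
    rw [← huv]; simp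
  · intro hm
    rcases List.mem_iff_append.mp hm with ⟨u, v, huv⟩
    exact ⟨u, v, by rw [huv]; simp⟩

-- ===== VERDICT (by name: the statement is the Claim_ definition above) =====
theorem addCatal2_spec : Claim_equal_addCatal2 := by
  intro s p _
  unfold Spec_addCatal2 addCatal2
  simp only [addCatal2_alt]
  rw [addCatal2Loop_eq, cut_eq]
  have hA := main_lemma s p s.toList 0 (by simp)
  simp only [Nat.cast_zero, zero_add] at hA
  set R := PySem.List.pyRange 0 ((cutLen s.toList : Nat) : Int) 1 with hR
  set keyf : Int → Char := fun i => s.toList.getD i.toNat ' ' with hkeyf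
  have hcle : cutLen s.toList ≤ s.toList.length := (List.takeWhile_sublist _).length_le
  have hkey : ∀ i ∈ R, PySem.Str.pyGet? s i = some (keyf i) := by
    intro i hi
    have hir : 0 ≤ i ∧ i < ((cutLen s.toList : Nat) : Int) := by
      have := (PySem.List.mem_pyRange_one (a := 0) (b := ((cutLen s.toList : Nat) : Int)) (x := i)).mp hi
      omega
    have hilt : i.toNat < s.toList.length := by omega
    have h0 : PySem.Str.pyGet? s ((i.toNat : Nat) : Int) = s.toList[i.toNat]? :=
      PySem.Str.pyGet?_natCast s i.toNat
    rw [List.getElem?_eq_getElem hilt] at h0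
    have h1 : keyf i = s.toList[i.toNat] := List.getD_eq_getElem s.toList ' ' hilt
    have h2 := PySem.Str.pyGet?_natCast s i.toNat
    rw [show ((i.toNat : Nat) : Int) = i from by omega] at h2
    rw [h1, h2, List.getElem?_eq_getElem hilt]
  set pos := R.foldl (fun pos i =>
      match PySem.Str.pyGet? s i with
      | some c => pos.modify c [] (· ++ [i])
      | none => pos) PySem.Dict.empty with hpos
  set bad := (PySem.Set.ofList p.toList).foldl (fun bad c => PySem.Set.update bad (pos.getD c [])) PySem.Set.empty with hbad
  have hpair : (R.filter (fun i => decide (i ∉ bad))).Pairwise (· < ·) :=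
    (PySem.List.pairwise_lt_pyRange_one (a := 0) (b := ((cutLen s.toList : Nat) : Int))).filter _
  have hperm : (R.filter (fun i => decide (i ∉ bad))).Perm (PySem.Set.diff (PySem.Set.ofList R) bad) := by
    apply (List.perm_ext_iff_of_nodup _ _).mpr
    · intro j
      rw [PySem.Set.mem_diff, PySem.Set.mem_ofList, List.mem_filter]
      simp
    · exact (PySem.List.nodup_pyRange_one 0 _).filter _
    · exact PySem.Set.nodup_diff _ _ (PySem.Set.nodup_ofList R)
  have hsorted : PySem.List.sorted (PySem.Set.diff (PySem.Set.ofList R) bad) (fun x => x) false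
      = R.filter (fun i => decide (i ∉ bad)) :=
    PySem.List.sorted_eq_of_perm_of_pairwise_lt _ _ _ hperm hpair
  rw [hA, hsorted]
  apply List.filter_congr
  intro j hj
  have hjr : 0 ≤ j ∧ j < ((cutLen s.toList : Nat) : Int) := by
    have := (PySem.List.mem_pyRange_one (a := 0) (b := ((cutLen s.toList : Nat) : Int)) (x := j)).mp hj
    omega
  have hlt : j.toNat < s.toList.length := by omega
  have hget : PySem.Str.pyGet? s j = some (s.toList[j.toNat]) := by
    have h0 : PySem.Str.pyGet? s ((j.toNat : Nat) : Int) = s.toList[j.toNat]? :=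
      PySem.Str.pyGet?_natCast s j.toNat
    rw [List.getElem?_eq_getElem hlt] at h0
    rwa [show ((j.toNat : Nat) : Int) = j by omega] at h0
  rw [hget]
  have hkj : keyf j = s.toList[j.toNat] := by
    have := hkey j hj
    rw [hget] at this
    exact (Option.some_inj.mp this).symm
  have hbadj : j ∈ bad ↔ s.toList[j.toNat] ∈ p.toList := by
    rw [hbad, bad_mem]
    simp only [PySem.Set.empty, List.not_mem_nil, false_or, PySem.Set.mem_ofList]
    constructor
    · rintro ⟨c, hc, hjc⟩
      rw [hpos, pos_getD s _ c keyf hkey, List.mem_filter] at hjc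
      have hkc : keyf j = c := by simpa using hjc.2
      rw [← hkj, hkc]
      exact hc
    · intro hm
      refine ⟨s.toList[j.toNat], hm, ?_⟩
      rw [hpos, pos_getD s _ _ keyf hkey, List.mem_filter]
      exact ⟨hj, by simp [hkj]⟩
  simp only []
  by_cases hm : s.toList[j.toNat] ∈ p.toList
  · rw [(isIn_singleton _ _).mpr hm]
    simp only [Bool.not_true]
    symm
    rw [decide_eq_false_iff_not]
    simp only [not_not]
    exact hbadj.mpr hm
  · have h1 : PySem.Str.isIn (String.singleton (s.toList[j.toNat])) p = false := by
      rw [Bool.eq_false_iff]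
      intro hc
      exact hm ((isIn_singleton _ _).mp hc)
    rw [h1]
    simp only [Bool.not_false]
    symm
    rw [decide_eq_true_iff]
    intro hc
    exact hm (hbadj.mp hc)
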